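-- pv_equiv track=rewrite | github.com/neoshrew/adventofcode | 2022/9/solve2.py | get_move_to
-- ===== SOURCE A (Python) =====
-- DIRECTIONS = [
--     (dx, dy)
--     for dx in range(-1, 2)
--     for dy in range(-1, 2)
--     if not (dx == dy == 0)
-- ]
--
-- def get_move_to(chunk_a, chunk_b):
--     if not (
--         abs(chunk_a[0]-chunk_b[0]) > 1
--         or abs(chunk_a[1]-chunk_b[1]) > 1
--     ):
--         # within 1, so don't move.
--         return None
--
--     # There's likely a more efficient way of doing this, but I'm lazy.
--     # Just check which of the 8 different directions would bring us closest.
--     # return that.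
--     return sorted(
--         (abs(chunk_a[0]-(chunk_b[0]+dx))+abs(chunk_a[1]-(chunk_b[1]+dy)), (dx, dy))
--         for dx, dy in DIRECTIONS
--     )[0][1]
-- ===== SOURCE B (Python) =====
-- def _sign(n):
--     return (n > 0) - (n < 0)
--
--
-- def get_move_to(chunk_a, chunk_b):
--     if abs(chunk_a[0] - chunk_b[0]) <= 1 and abs(chunk_a[1] - chunk_b[1]) <= 1:
--         # within 1, so don't move.
--         return None
--     return (_sign(chunk_a[0] - chunk_b[0]), _sign(chunk_a[1] - chunk_b[1]))
-- ===== Notes on version B (the rewrite author's own statement) =====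
-- stated objective: simpler
-- what changed: Replaces the build-all-8-candidate-moves-and-sort-by-distance search with a direct per-axis sign (clamp) step, which is the unique minimizer of the Manhattan distance.
import Mathlib
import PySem

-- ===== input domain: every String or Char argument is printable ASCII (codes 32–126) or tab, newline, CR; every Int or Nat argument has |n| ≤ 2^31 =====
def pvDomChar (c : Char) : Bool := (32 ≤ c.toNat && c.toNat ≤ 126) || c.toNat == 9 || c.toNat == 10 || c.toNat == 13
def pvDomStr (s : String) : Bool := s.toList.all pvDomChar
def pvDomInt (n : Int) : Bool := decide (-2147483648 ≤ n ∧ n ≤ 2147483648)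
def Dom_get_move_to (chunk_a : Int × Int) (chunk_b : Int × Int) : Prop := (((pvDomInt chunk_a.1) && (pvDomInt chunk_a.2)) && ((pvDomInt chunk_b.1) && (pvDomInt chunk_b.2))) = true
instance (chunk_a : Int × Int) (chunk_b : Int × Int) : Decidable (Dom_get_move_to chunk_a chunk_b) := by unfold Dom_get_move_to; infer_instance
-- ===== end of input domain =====

-- B replaces A's build-8-candidates-and-sort search with a direct per-axis sign step (simpler).


-- ===== PORT A =====
-- Python abs() on an int; exact
def pyabs (n : Int) : Int := (n.natAbs : Int)

def DIRECTIONS : List (Int × Int) :=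
  (PySem.List.pyRange (-1) 2 1).flatMap (fun dx =>
    (PySem.List.pyRange (-1) 2 1).filterMap (fun dy =>
      if dx = 0 ∧ dy = 0 then none else some (dx, dy)))

def get_move_to (chunk_a : Int × Int) (chunk_b : Int × Int) : Option (Int × Int) :=
  if ¬ (pyabs (chunk_a.1 - chunk_b.1) > 1 ∨ pyabs (chunk_a.2 - chunk_b.2) > 1) then
    none
  else
    -- Python sorts the pairs (dist, (dx, dy)) lexicographically: dist first, then (dx, dy)
    -- lexicographically.  Since dx, dy ∈ {-1, 0, 1}, the lexicographic order on (dx, dy) is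
    -- exactly the numeric order of 3*dx+dy, so sorted2 with these two keys is exact here.
    (PySem.List.pyGet?
      (PySem.List.sorted2
        (DIRECTIONS.map (fun d =>
          (pyabs (chunk_a.1 - (chunk_b.1 + d.1)) + pyabs (chunk_a.2 - (chunk_b.2 + d.2)), d)))
        (fun t => t.1) (fun t => 3 * t.2.1 + t.2.2))
      0).map (fun t => t.2)

-- ===== PORT B =====
def psign (n : Int) : Int := (if n > 0 then (1 : Int) else 0) - (if n < 0 then (1 : Int) else 0)

def get_move_to_alt (chunk_a : Int × Int) (chunk_b : Int × Int) : Option (Int × Int) :=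
  if pyabs (chunk_a.1 - chunk_b.1) ≤ 1 ∧ pyabs (chunk_a.2 - chunk_b.2) ≤ 1 then
    none
  else
    some (psign (chunk_a.1 - chunk_b.1), psign (chunk_a.2 - chunk_b.2))

-- ===== PRECONDITION & SPEC =====
def Spec_get_move_to (chunk_a : Int × Int) (chunk_b : Int × Int) (out : Option (Int × Int)) : Prop := out = get_move_to_alt chunk_a chunk_b
instance (chunk_a : Int × Int) (chunk_b : Int × Int) (out : Option (Int × Int)) : Decidable (Spec_get_move_to chunk_a chunk_b out) := by unfold Spec_get_move_to; infer_instance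

-- ===== CLAIM (what is proved, stated in full; the proofs are below) =====
def Claim_equal_get_move_to : Prop := ∀ (chunk_a : Int × Int) (chunk_b : Int × Int), Dom_get_move_to chunk_a chunk_b → Spec_get_move_to chunk_a chunk_b (get_move_to chunk_a chunk_b)

-- ===== LEMMAS AND PROOFS =====

lemma DIRECTIONS_eq :
    DIRECTIONS = [(-1,-1),(-1,0),(-1,1),(0,-1),(0,1),(1,-1),(1,0),(1,1)] := by decide

lemma insertBy_front {α : Type} (before : α → α → Bool) (x : α) (acc : List α)
    (h : ∀ y ∈ acc, before x y = true) :
    PySem.List.insertBy before x acc = x :: acc := by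
  cases acc with
  | nil => rfl
  | cons y ys => simp [PySem.List.insertBy, h y (by simp)]

lemma insertBy_cons_of_not {α : Type} (before : α → α → Bool) (x m : α) (rest : List α)
    (h : before x m = false) :
    PySem.List.insertBy before x (m :: rest) = m :: PySem.List.insertBy before x rest := by
  simp [PySem.List.insertBy, h]

-- the head of the insertion-sort fold is the element with strictly minimal first key
lemma foldl_insertBy_strictmin {α : Type} (k1 : α → Int) (before : α → α → Bool) (m : α)
    (hlt : ∀ a b, k1 a < k1 b → before a b = true)
    (hirr : ∀ a, before a a = false)
    (hge : ∀ a b, k1 b < k1 a → before a b = false) :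
    ∀ (xs acc : List α),
      (∀ y, y ∈ xs ∨ y ∈ acc → y = m ∨ k1 m < k1 y) →
      (m ∈ acc → ∃ t, acc = m :: t) →
      (m ∈ xs ∨ m ∈ acc) →
      ∃ t, xs.foldl (fun acc x => PySem.List.insertBy before x acc) acc = m :: t := by
  intro xs
  induction xs with
  | nil =>
    intro acc hall hacc hmem
    rcases hmem with h | h
    · simp at h
    · exact hacc h
  | cons x xs ih =>
    intro acc hall hacc hmem
    simp only [List.foldl_cons]
    apply ih (PySem.List.insertBy before x acc)
    · intro y hy
      rcases hy with hy | hy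
      · exact hall y (Or.inl (by simp [hy]))
      · rcases (PySem.List.mem_insertBy before x y acc).1 hy with h | h
        · exact hall y (Or.inl (by simp [h]))
        · exact hall y (Or.inr h)
    · intro hm
      by_cases hma : m ∈ acc
      · obtain ⟨t, ht⟩ := hacc hma
        subst ht
        have hxm : before x m = false := by
          rcases hall x (Or.inl (by simp)) with h | h
          · rw [h]; exact hirr m
          · exact hge x m h
        exact ⟨PySem.List.insertBy before x t, insertBy_cons_of_not before x m t hxm⟩
      · have hxm : x = m := by
          rcases (PySem.List.mem_insertBy before x m acc).1 hm with h | h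
          · exact h.symm
          · exact absurd h hma
        subst hxm
        refine ⟨acc, insertBy_front before x acc ?_⟩
        intro y hy
        rcases hall y (Or.inr hy) with h | h
        · exact absurd (h ▸ hy) hma
        · exact hlt x y h
    · by_cases hxm : x = m
      · exact Or.inr ((PySem.List.mem_insertBy before x m acc).2 (Or.inl hxm.symm))
      · rcases hmem with h | h
        · rcases (List.mem_cons.1 h) with h | h
          · exact absurd h.symm hxm
          · exact Or.inl h
        · exact Or.inr ((PySem.List.mem_insertBy before x m acc).2 (Or.inr h))

lemma main_lemma (u v : Int) (h : 1 < pyabs u ∨ 1 < pyabs v) :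
    ∃ t,
      PySem.List.sorted2
        (DIRECTIONS.map (fun d => (pyabs (u - d.1) + pyabs (v - d.2), d)))
        (fun t => t.1) (fun t => 3 * t.2.1 + t.2.2)
      = (pyabs (u - psign u) + pyabs (v - psign v), (psign u, psign v)) :: t := by
  have hsorted2 :
      PySem.List.sorted2
        (DIRECTIONS.map (fun d => (pyabs (u - d.1) + pyabs (v - d.2), d)))
        (fun t => t.1) (fun t => 3 * t.2.1 + t.2.2)
      = (DIRECTIONS.map (fun d => (pyabs (u - d.1) + pyabs (v - d.2), d))).foldl
          (fun acc x => PySem.List.insertBy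
            (fun a b => decide (a.1 < b.1) || (!decide (b.1 < a.1) && decide (3 * a.2.1 + a.2.2 < 3 * b.2.1 + b.2.2))) x acc) [] := rfl
  rw [hsorted2]
  refine foldl_insertBy_strictmin Prod.fst
    (fun a b => decide (a.1 < b.1) || (!decide (b.1 < a.1) && decide (3 * a.2.1 + a.2.2 < 3 * b.2.1 + b.2.2)))
    (pyabs (u - psign u) + pyabs (v - psign v), (psign u, psign v))
    (fun a b hab => by simp [hab])
    (fun a => by simp)
    (fun a b hab => by simp; exact ⟨by omega, fun hba => by omega⟩)
    _ _ ?_ ?_ ?_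
  · intro y hy
    rcases hy with hy | hy
    swap
    · simp at hy
    rw [DIRECTIONS_eq] at hy
    simp only [List.map_cons, List.map_nil, List.mem_cons, List.not_mem_nil, or_false] at hy
    simp only [pyabs] at h
    simp only [psign, pyabs] at hy ⊢
    rcases hy with rfl|rfl|rfl|rfl|rfl|rfl|rfl|rfl <;>
      simp only [Prod.mk.injEq] <;> split_ifs <;>
      first
        | (right; omega)
        | (left; refine ⟨by omega, by norm_num, by norm_num⟩)
  · intro hmem; exact absurd hmem (by simp)
  · left
    rw [DIRECTIONS_eq]
    simp only [pyabs] at h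
    simp only [List.map_cons, List.map_nil, List.mem_cons, List.not_mem_nil, or_false,
      psign, pyabs, Prod.mk.injEq]
    split_ifs <;> norm_num <;> omega

-- ===== VERDICT (by name: the statement is the Claim_ definition above) =====
theorem get_move_to_spec : Claim_equal_get_move_to := by
  intro a b _
  unfold Spec_get_move_to get_move_to get_move_to_alt
  by_cases hg : pyabs (a.1 - b.1) ≤ 1 ∧ pyabs (a.2 - b.2) ≤ 1
  · rw [if_pos (by omega), if_pos hg]
  · rw [if_neg (by omega), if_neg hg]
    obtain ⟨t, ht⟩ := main_lemma (a.1 - b.1) (a.2 - b.2) (by unfold pyabs at *; omega)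
    have : (DIRECTIONS.map (fun d =>
        (pyabs (a.1 - (b.1 + d.1)) + pyabs (a.2 - (b.2 + d.2)), d)))
        = (DIRECTIONS.map (fun d =>
        (pyabs ((a.1 - b.1) - d.1) + pyabs ((a.2 - b.2) - d.2), d))) := by
      apply List.map_congr_left; intro d _; ring_nf
    rw [this, ht, PySem.List.pyGet?_zero_cons]
    rfl
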